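-- pv_equiv track=rewrite | github.com/fbilan/Thesis | A7_Jaccard_Index.py | extend_subtypes
-- ===== SOURCE A (Python) =====
-- def extend_subtypes(liste):
--     singles = list(dict.fromkeys(liste))
--     final_list = []
--     for entry in singles:
--         entry_count = liste.count(entry)
--         for x in range(entry_count):
--             new_entry = str(entry)+str(x)
--             final_list.append(new_entry)
--     return final_list
-- ===== SOURCE B (Python) =====
-- def extend_subtypes(liste):
--     groups = {}
--     for entry in liste:
--         built = groups.setdefault(entry, [])
--         built.append(str(entry) + str(len(built)))
--     out = []
--     for built in groups.values():
--         out += built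
--     return out
-- ===== Notes on version B (the rewrite author's own statement) =====
-- stated objective: faster
-- what changed: Replaces dedup + liste.count + range per distinct entry by a single pass that grows a dict of already-built indexed strings per entry and then flattens the dict's values.
import Mathlib
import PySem

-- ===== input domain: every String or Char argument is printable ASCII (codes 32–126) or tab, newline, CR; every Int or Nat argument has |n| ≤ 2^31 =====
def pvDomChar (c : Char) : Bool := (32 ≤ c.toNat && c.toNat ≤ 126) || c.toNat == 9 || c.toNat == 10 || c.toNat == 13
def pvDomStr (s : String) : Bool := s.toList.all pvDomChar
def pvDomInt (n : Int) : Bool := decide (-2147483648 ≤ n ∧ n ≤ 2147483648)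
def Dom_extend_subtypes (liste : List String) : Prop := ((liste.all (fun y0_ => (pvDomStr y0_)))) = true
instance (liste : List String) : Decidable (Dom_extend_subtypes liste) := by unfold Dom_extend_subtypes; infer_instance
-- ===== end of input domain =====

-- B replaces A's dedup + per-entry count + range loop by a single pass keeping a dict of
-- already-built indexed strings per entry, then flattens the dict's values (objective: faster, one pass).

-- ===== PORT A =====
def extend_subtypes (liste : List String) : List String :=
  let singles := PySem.List.dedup liste
  singles.foldl (fun final_list entry =>
    let entry_count : Int := PySem.List.count liste entry
    (PySem.List.pyRange 0 entry_count 1).foldl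
      (fun fl x => fl ++ [entry ++ PySem.Int.toStr x]) final_list) []

-- ===== PORT B =====
def extend_subtypes_alt (liste : List String) : List String :=
  let groups : PySem.Dict String (List String) :=
    liste.foldl (fun d entry =>
      let built := d.getD entry []
      d.insert entry (built ++ [entry ++ PySem.Int.toStr (PySem.List.len built)]))
      PySem.Dict.empty
  groups.values.foldl (fun out built => out ++ built) []

-- ===== PRECONDITION & SPEC =====
def Spec_extend_subtypes (liste : List String) (out : List String) : Prop := out = extend_subtypes_alt liste
instance (liste : List String) (out : List String) : Decidable (Spec_extend_subtypes liste out) := by unfold Spec_extend_subtypes; infer_instance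

-- ===== CLAIM (what is proved, stated in full; the proofs are below) =====
def Claim_equal_extend_subtypes : Prop := ∀ (liste : List String), Dom_extend_subtypes liste → Spec_extend_subtypes liste (extend_subtypes liste)

-- ===== LEMMAS AND PROOFS =====

-- common normal form: grouped output as a flatMap over the deduped list
def pvGroupsOf (liste : List String) : List (String × List String) :=
  (PySem.List.dedup liste).map
    (fun k => (k, (List.range (liste.count k)).map (fun i => k ++ PySem.Int.toStr (i : Int))))

theorem extend_subtypes_eq_flatMap (liste : List String) :
    extend_subtypes liste = (pvGroupsOf liste).flatMap (·.2) := by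
  unfold extend_subtypes pvGroupsOf
  simp only [PySem.List.foldl_append_singleton_eq_map, PySem.List.foldl_append_eq_flatMap,
    List.nil_append, List.flatMap_map]
  congr 1
  funext entry
  rw [PySem.List.pyRange_one]
  simp [List.map_map, PySem.List.count_eq, Function.comp_def, List.flatMap]
  rw [List.map_eq_flatMap, List.flatMap_def]

theorem groups_items (liste : List String) :
    (liste.foldl (fun d entry =>
      let built := d.getD entry []
      d.insert entry (built ++ [entry ++ PySem.Int.toStr (PySem.List.len built)]))
      (PySem.Dict.empty : PySem.Dict String (List String))).items = pvGroupsOf liste := by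
  induction liste using List.reverseRecOn with
  | nil => rfl
  | append_singleton xs x ih =>
    rw [List.foldl_append, List.foldl_cons, List.foldl_nil]
    have hkeys : (xs.foldl (fun d entry =>
        let built := d.getD entry []
        d.insert entry (built ++ [entry ++ PySem.Int.toStr (PySem.List.len built)]))
        (PySem.Dict.empty : PySem.Dict String (List String))).keys = PySem.List.dedup xs := by
      simp only [PySem.Dict.keys, ih, pvGroupsOf, List.map_map]
      simp [Function.comp_def]
    have hnodup : (xs.foldl (fun d entry =>
        let built := d.getD entry []
        d.insert entry (built ++ [entry ++ PySem.Int.toStr (PySem.List.len built)]))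
        (PySem.Dict.empty : PySem.Dict String (List String))).keys.Nodup := by
      rw [hkeys, PySem.List.dedup_eq_ofList]; exact PySem.Set.nodup_ofList xs
    by_cases hx : x ∈ xs
    · have hcont : (xs.foldl (fun d entry =>
          let built := d.getD entry []
          d.insert entry (built ++ [entry ++ PySem.Int.toStr (PySem.List.len built)]))
          (PySem.Dict.empty : PySem.Dict String (List String))).contains x = true := by
        rw [PySem.Dict.contains_iff_mem_keys, hkeys]; exact (PySem.List.mem_dedup xs x).mpr hx
      have hget : (xs.foldl (fun d entry =>
          let built := d.getD entry []
          d.insert entry (built ++ [entry ++ PySem.Int.toStr (PySem.List.len built)]))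
          (PySem.Dict.empty : PySem.Dict String (List String))).getD x []
          = (List.range (xs.count x)).map (fun i => x ++ PySem.Int.toStr (i : Int)) := by
        apply PySem.Dict.getD_of_mem_items _ ?_ hnodup
        rw [ih]
        unfold pvGroupsOf
        exact List.mem_map.mpr ⟨x, (PySem.List.mem_dedup xs x).mpr hx, rfl⟩
      show (PySem.Dict.insert _ x _).items = _
      rw [PySem.Dict.items_insert_of_contains _ _ hcont, ih, hget]
      unfold pvGroupsOf
      rw [PySem.List.dedup_eq_ofList, PySem.List.dedup_eq_ofList,
        PySem.Set.ofList_append_singleton,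
        PySem.Set.add_of_mem ((PySem.Set.mem_ofList xs x).mpr hx), List.map_map]
      apply List.map_congr_left
      intro k hk
      by_cases hkx : k = x
      · subst hkx
        simp [List.count_append, List.range_succ]
      · have hxk : x ≠ k := fun h => hkx h.symm
        have : (k == x) = false := by simp [hkx]
        simp [List.count_append, hxk, hkx]
    · have hcont : (xs.foldl (fun d entry =>
          let built := d.getD entry []
          d.insert entry (built ++ [entry ++ PySem.Int.toStr (PySem.List.len built)]))
          (PySem.Dict.empty : PySem.Dict String (List String))).contains x = false := by
        rw [← Bool.not_eq_true, PySem.Dict.contains_iff_mem_keys, hkeys]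
        simpa [PySem.List.mem_dedup] using hx
      have hget : (xs.foldl (fun d entry =>
          let built := d.getD entry []
          d.insert entry (built ++ [entry ++ PySem.Int.toStr (PySem.List.len built)]))
          (PySem.Dict.empty : PySem.Dict String (List String))).getD x [] = [] :=
        PySem.Dict.getD_of_not_contains _ _ hcont
      show (PySem.Dict.insert _ x _).items = _
      rw [PySem.Dict.items_insert_of_not_contains _ _ hcont, ih, hget]
      unfold pvGroupsOf
      rw [PySem.List.dedup_eq_ofList, PySem.List.dedup_eq_ofList,
        PySem.Set.ofList_append_singleton,
        PySem.Set.add_of_not_mem (fun h => hx ((PySem.Set.mem_ofList xs x).mp h)),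
        List.map_append]
      congr 1
      · apply List.map_congr_left
        intro k hk
        have hkx : k ≠ x := fun h => hx (by
          exact h ▸ ((PySem.Set.mem_ofList xs k).mp hk))
        have hxk : x ≠ k := fun h => hkx h.symm
        simp [List.count_append, hxk]
      · simp [List.count_append, List.count_eq_zero_of_not_mem hx]

theorem extend_subtypes_alt_eq_flatMap (liste : List String) :
    extend_subtypes_alt liste = (pvGroupsOf liste).flatMap (·.2) := by
  unfold extend_subtypes_alt
  rw [PySem.List.foldl_append_eq_flatten]
  simp only [PySem.Dict.values, groups_items, List.nil_append, List.flatMap_def]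

-- ===== VERDICT (by name: the statement is the Claim_ definition above) =====
theorem extend_subtypes_spec : Claim_equal_extend_subtypes := by
  intro liste _
  unfold Spec_extend_subtypes
  rw [extend_subtypes_eq_flatMap, extend_subtypes_alt_eq_flatMap]
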